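-- pv_equiv track=rewrite | github.com/eic/EICrecon | src/tools/default_flags_table/reco_flags.py | has_unit_conversion
-- ===== SOURCE A (Python) =====
-- known_units_list = ['eV', 'MeV', 'GeV', 'mm', 'cm', 'mrad', 'ns', 'ps']
--
-- def has_unit_conversion(value):
--     """Checks if string value use units like X*MeV or X/GeV"""
--     for unit_name in known_units_list:
--         if f'*{unit_name}' in value or \
--                 f'* {unit_name}' in value or \
--                 f'/{unit_name}' in value or \
--                 f'/ {unit_name}' in value:
--             return True
--     return False
-- ===== SOURCE B (Python) =====
-- _UNITS = ('eV', 'MeV', 'GeV', 'mm', 'cm', 'mrad', 'ns', 'ps')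
--
-- def has_unit_conversion(value):
--     """Checks if string value use units like X*MeV or X/GeV"""
--     n = len(value)
--     for i in range(n):
--         if value[i] == '*' or value[i] == '/':
--             j = i + 1
--             if j < n and value[j] == ' ':
--                 j += 1
--             if value.startswith(_UNITS, j):
--                 return True
--     return False
-- ===== Notes on version B (the rewrite author's own statement) =====
-- stated objective: alternative
-- what changed: Replaces the loop over units with four substring searches each by a single left-to-right scan that anchors at '*' or '/', skips one optional space, and tests all units at once with a tuple startswith.
import Mathlib
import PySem

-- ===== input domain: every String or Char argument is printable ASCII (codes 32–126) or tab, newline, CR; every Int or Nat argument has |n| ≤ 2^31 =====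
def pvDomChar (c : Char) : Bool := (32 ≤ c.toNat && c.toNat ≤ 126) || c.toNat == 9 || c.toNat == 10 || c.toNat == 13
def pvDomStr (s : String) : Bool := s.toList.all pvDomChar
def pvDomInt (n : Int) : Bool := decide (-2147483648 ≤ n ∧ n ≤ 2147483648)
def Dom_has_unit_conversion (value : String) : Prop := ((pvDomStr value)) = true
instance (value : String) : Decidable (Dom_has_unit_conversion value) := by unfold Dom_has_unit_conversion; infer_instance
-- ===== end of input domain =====

-- B is an alternative single-scan implementation (anchor at '*'/'/', optional space, prefix test);
-- equivalence of the return value is proved for all strings (Dom is not needed).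

-- ===== PORT A =====
-- known_units_list, as lists of characters
def unitsA : List (List Char) :=
  [['e','V'], ['M','e','V'], ['G','e','V'], ['m','m'], ['c','m'], ['m','r','a','d'], ['n','s'], ['p','s']]

-- the for-loop over known_units_list: four substring ('in') tests per unit, early return True
def loopA : List (List Char) → List Char → Bool
  | [], _ => false
  | u :: rest, v =>
    if PySem.Chars.isIn ('*' :: u) v || PySem.Chars.isIn ('*' :: ' ' :: u) v
        || PySem.Chars.isIn ('/' :: u) v || PySem.Chars.isIn ('/' :: ' ' :: u) v
    then true
    else loopA rest v

def has_unit_conversion (value : String) : Bool := loopA unitsA value.toList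

-- ===== PORT B =====
-- value.startswith(_UNITS, j): does any unit start at this point?
-- (_UNITS is the same literal tuple of units, so B's port reuses the constant unitsA)
def startsAny (cs : List Char) : Bool := unitsA.any (fun u => PySem.Chars.startswith cs u)

-- the 'j = i+1; skip one space; startswith' step of B, applied to the part after '*'/'/'
def hit : List Char → Bool
  | [] => startsAny []
  | c :: r => if c = ' ' then startsAny r else startsAny (c :: r)

-- the single scan 'for i in range(n)' with early return
def scanB : List Char → Bool
  | [] => false
  | c :: rest => ((c == '*' || c == '/') && hit rest) || scanB rest

def has_unit_conversion_alt (value : String) : Bool := scanB value.toList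

-- ===== PRECONDITION & SPEC =====
def Spec_has_unit_conversion (value : String) (out : Bool) : Prop := out = has_unit_conversion_alt value
instance (value : String) (out : Bool) : Decidable (Spec_has_unit_conversion value out) := by unfold Spec_has_unit_conversion; infer_instance

-- ===== CLAIM (what is proved, stated in full; the proofs are below) =====
def Claim_equal_has_unit_conversion : Prop := ∀ (value : String), Dom_has_unit_conversion value → Spec_has_unit_conversion value (has_unit_conversion value)

-- ===== LEMMAS AND PROOFS =====

-- every unit is nonempty and does not start with a space
theorem units_head_ne_space : ∀ u ∈ unitsA, u ≠ [] ∧ u.headD ' ' ≠ ' ' := by decide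

theorem startsAny_iff (cs : List Char) :
    startsAny cs = true ↔ ∃ u ∈ unitsA, u <+: cs := by
  simp [startsAny, List.any_eq_true, PySem.Chars.startswith_iff]

theorem loopA_cons (u : List Char) (rest : List (List Char)) (v : List Char) :
    loopA (u :: rest) v =
      ((PySem.Chars.isIn ('*' :: u) v || PySem.Chars.isIn ('*' :: ' ' :: u) v
        || PySem.Chars.isIn ('/' :: u) v || PySem.Chars.isIn ('/' :: ' ' :: u) v)
        || loopA rest v) := by
  cases hb : (PySem.Chars.isIn ('*' :: u) v || PySem.Chars.isIn ('*' :: ' ' :: u) v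
      || PySem.Chars.isIn ('/' :: u) v || PySem.Chars.isIn ('/' :: ' ' :: u) v) <;>
    simp [loopA, hb]

theorem loopA_iff (us : List (List Char)) (v : List Char) :
    loopA us v = true ↔ ∃ u ∈ us,
      (PySem.Chars.isIn ('*' :: u) v || PySem.Chars.isIn ('*' :: ' ' :: u) v
        || PySem.Chars.isIn ('/' :: u) v || PySem.Chars.isIn ('/' :: ' ' :: u) v) = true := by
  induction us with
  | nil => simp [loopA]
  | cons u rest ih =>
    rw [loopA_cons, Bool.or_eq_true, ih]
    simp only [List.mem_cons]
    constructor
    · rintro (h | ⟨u', hu', h⟩)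
      · exact ⟨u, Or.inl rfl, h⟩
      · exact ⟨u', Or.inr hu', h⟩
    · rintro ⟨u', rfl | hu', h⟩
      · exact Or.inl h
      · exact Or.inr ⟨u', hu', h⟩

theorem scanB_iff (v : List Char) :
    scanB v = true ↔ ∃ c r, (c = '*' ∨ c = '/') ∧ (c :: r) <:+ v ∧ hit r = true := by
  induction v with
  | nil => simp [scanB]
  | cons a v ih =>
    simp only [scanB, Bool.or_eq_true, Bool.and_eq_true, beq_iff_eq, ih]
    constructor
    · rintro (⟨hc, hh⟩ | ⟨c, r, hc, hs, hh⟩)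
      · exact ⟨a, v, hc, List.suffix_refl _, hh⟩
      · exact ⟨c, r, hc, hs.trans (List.suffix_cons a v), hh⟩
    · rintro ⟨c, r, hc, hs, hh⟩
      rcases List.suffix_cons_iff.mp hs with he | hs
      · cases he; exact Or.inl ⟨hc, hh⟩
      · exact Or.inr ⟨c, r, hc, hs, hh⟩

-- if a unit starts at r, then r does not start with a space and hit r = startsAny r = true
theorem hit_of_unit_prefix {u r : List Char} (hu : u ∈ unitsA) (hp : u <+: r) :
    hit r = true := by
  obtain ⟨hne, hhead⟩ := units_head_ne_space u hu
  obtain ⟨a, u', rfl⟩ := List.exists_cons_of_ne_nil hne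
  obtain ⟨r', rfl⟩ := hp
  have ha : a ≠ ' ' := by simpa using hhead
  rw [List.cons_append]
  simp only [hit, if_neg ha]
  exact (startsAny_iff _).mpr ⟨_, hu, ⟨r', by simp⟩⟩

theorem hit_space_of_unit_prefix {u r : List Char} (hu : u ∈ unitsA) (hp : u <+: r) :
    hit (' ' :: r) = true := by
  simp only [hit]
  exact (startsAny_iff _).mpr ⟨_, hu, hp⟩

-- an infix of the form c :: u ++ … gives a suffix c :: r with u <+: r
theorem infix_cons_iff {c : Char} {u v : List Char} :
    (c :: u) <:+: v ↔ ∃ r, (c :: r) <:+ v ∧ u <+: r := by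
  rw [List.infix_iff_prefix_suffix]
  constructor
  · rintro ⟨t, hp, hs⟩
    obtain ⟨t', rfl⟩ := hp
    exact ⟨u ++ t', by simpa using hs, List.prefix_append _ _⟩
  · rintro ⟨r, hs, hp⟩
    exact ⟨c :: r, by simpa [List.cons_prefix_cons] using hp, hs⟩

theorem main_eq (v : List Char) : loopA unitsA v = scanB v := by
  rw [Bool.eq_iff_iff, loopA_iff, scanB_iff]
  constructor
  · rintro ⟨u, hu, hc⟩
    simp only [Bool.or_eq_true, PySem.Chars.isIn_iff_infix] at hc
    rcases hc with ((h | h) | h) | h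
    · obtain ⟨r, hs, hp⟩ := infix_cons_iff.mp h
      exact ⟨'*', r, Or.inl rfl, hs, hit_of_unit_prefix hu hp⟩
    · obtain ⟨r, hs, hp⟩ := infix_cons_iff.mp h
      obtain ⟨t, rfl⟩ := hp
      exact ⟨'*', _, Or.inl rfl, hs, hit_space_of_unit_prefix hu (List.prefix_append _ _)⟩
    · obtain ⟨r, hs, hp⟩ := infix_cons_iff.mp h
      exact ⟨'/', r, Or.inr rfl, hs, hit_of_unit_prefix hu hp⟩
    · obtain ⟨r, hs, hp⟩ := infix_cons_iff.mp h
      obtain ⟨t, rfl⟩ := hp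
      exact ⟨'/', _, Or.inr rfl, hs, hit_space_of_unit_prefix hu (List.prefix_append _ _)⟩
  · rintro ⟨c, r, hc, hs, hh⟩
    match r, hh with
    | [], hh => exact absurd hh (by decide)
    | a :: r0, hh =>
      by_cases ha : a = ' '
      · subst ha
        simp only [hit] at hh
        obtain ⟨u, hu, hp⟩ := (startsAny_iff r0).mp hh
        have hinf : (c :: ' ' :: u) <:+: v :=
          infix_cons_iff.mpr ⟨' ' :: r0, hs, List.cons_prefix_cons.mpr ⟨rfl, hp⟩⟩
        refine ⟨u, hu, ?_⟩
        rcases hc with rfl | rfl <;>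
          simp [PySem.Chars.isIn_iff_infix, hinf]
      · simp only [hit, if_neg ha] at hh
        obtain ⟨u, hu, hp⟩ := (startsAny_iff _).mp hh
        have hinf : (c :: u) <:+: v := infix_cons_iff.mpr ⟨a :: r0, hs, hp⟩
        refine ⟨u, hu, ?_⟩
        rcases hc with rfl | rfl <;>
          simp [PySem.Chars.isIn_iff_infix, hinf]

-- ===== VERDICT (by name: the statement is the Claim_ definition above) =====
theorem has_unit_conversion_spec : Claim_equal_has_unit_conversion := by
  intro value _
  unfold Spec_has_unit_conversion has_unit_conversion has_unit_conversion_alt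
  exact main_eq value.toList
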